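-- pv_equiv track=rewrite | github.com/jinxac/ds-algo | array/factorial_large_number.py | bare_array
-- ===== SOURCE A (Python) =====
-- def bare_array(n):
--   arr = [1]
--
--   for current_num in range(2, n+1):
--     carry = 0
--     pos = 0
--     while pos < len(arr):
--       temp = arr[pos] * current_num + carry
--       carry, temp = divmod(temp, 10)
--       arr[pos] = temp
--       pos += 1
--
--     while carry:
--       carry, val = divmod(carry, 10)
--       arr.append(val)
--
--   arr = list(reversed(arr))
--   for i in range(len(arr)):
--     arr[i] = str(arr[i])
--
--   return ''.join(arr)
-- ===== SOURCE B (Python) =====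
-- def bare_array(n):
--   result = 1
--   for current_num in range(2, n + 1):
--     result *= current_num
--   return str(result)
-- ===== Notes on version B (the rewrite author's own statement) =====
-- stated objective: simpler
-- what changed: Replaces the little-endian decimal digit array with its per-digit multiply/carry loops and final reverse/map/join by a single integer accumulator multiplied in one loop and converted with str().
import Mathlib
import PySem

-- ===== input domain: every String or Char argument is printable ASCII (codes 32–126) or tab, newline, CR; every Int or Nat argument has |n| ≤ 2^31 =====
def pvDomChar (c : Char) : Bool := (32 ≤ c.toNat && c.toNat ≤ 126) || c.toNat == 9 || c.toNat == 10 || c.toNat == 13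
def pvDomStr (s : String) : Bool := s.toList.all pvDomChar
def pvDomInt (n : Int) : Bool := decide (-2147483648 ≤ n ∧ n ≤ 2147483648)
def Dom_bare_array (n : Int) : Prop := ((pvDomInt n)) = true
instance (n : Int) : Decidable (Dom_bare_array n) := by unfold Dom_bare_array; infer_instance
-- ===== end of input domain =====

-- B replaces A's digit-array bignum (per-digit multiply/carry loops, reverse and join)
-- by one integer accumulator and str(); objective: simpler.

-- ===== PORT A =====

-- inner 'while pos < len(arr)' loop: rewrite each digit to (arr[pos]*c+carry) % 10,
-- threading carry = temp // 10; returns (updated digits, final carry)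
def mulDigits (arr : List Int) (c carry : Int) : List Int × Int :=
  match arr with
  | [] => ([], carry)
  | d :: rest =>
    let t := d * c + carry
    let p := mulDigits rest c (PySem.Int.floordiv t 10)
    (PySem.Int.mod t 10 :: p.1, p.2)

-- 'while carry:' loop appending divmod(carry, 10) digits (carry is never negative when reached)
def carryDigits (c : Int) : List Int :=
  if 0 < c then PySem.Int.mod c 10 :: carryDigits (PySem.Int.floordiv c 10) else []
termination_by c.toNat
decreasing_by
  rw [PySem.Int.floordiv_eq_ediv_of_pos (by norm_num)]
  omega

def bare_array (n : Int) : String :=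
  let arr := (PySem.List.pyRange 2 (n + 1)).foldl
    (fun arr current_num =>
      let p := mulDigits arr current_num 0
      p.1 ++ carryDigits p.2) [1]
  PySem.Str.join "" (arr.reverse.map PySem.Int.toStr)

-- ===== PORT B =====
def bare_array_alt (n : Int) : String :=
  PySem.Int.toStr ((PySem.List.pyRange 2 (n + 1)).foldl (fun result current_num => result * current_num) 1)

-- ===== PRECONDITION & SPEC =====
def Spec_bare_array (n : Int) (out : String) : Prop := out = bare_array_alt n
instance (n : Int) (out : String) : Decidable (Spec_bare_array n out) := by unfold Spec_bare_array; infer_instance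

-- ===== CLAIM (what is proved, stated in full; the proofs are below) =====
def Claim_equal_bare_array : Prop := ∀ (n : Int), Dom_bare_array n → Spec_bare_array n (bare_array n)

-- ===== LEMMAS AND PROOFS =====

lemma carryDigits_pos {c : Int} (h : 0 < c) :
    carryDigits c = PySem.Int.mod c 10 :: carryDigits (PySem.Int.floordiv c 10) := by
  rw [carryDigits]; simp [h]

lemma carryDigits_nonpos {c : Int} (h : ¬ 0 < c) : carryDigits c = [] := by
  rw [carryDigits]; simp [h]

-- one pass of the inner multiply/carry loop followed by the carry-append loop
-- turns the digit string of m into the digit string of m*c + carry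
lemma mulDigits_carry (k : Nat) :
    ∀ (m c carry : Int), m.toNat ≤ k → 0 ≤ m → 1 ≤ c → 0 ≤ carry →
      (mulDigits (carryDigits m) c carry).1 ++ carryDigits (mulDigits (carryDigits m) c carry).2
        = carryDigits (m * c + carry) := by
  induction k with
  | zero =>
    intro m c carry hk hm hc hcar
    have hm0 : m = 0 := by omega
    subst hm0
    rw [carryDigits_nonpos (by omega)]
    simp [mulDigits]
  | succ k ih =>
    intro m c carry hk hm hc hcar
    by_cases hpos : 0 < m
    · have h10 : (0:Int) < 10 := by norm_num
      rw [carryDigits_pos hpos]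
      rw [PySem.Int.mod_eq_emod_of_pos h10, PySem.Int.floordiv_eq_ediv_of_pos h10]
      simp only [mulDigits]
      set t : Int := m % 10 * c + carry with ht
      have hmodt : 0 ≤ m % 10 ∧ m % 10 < 10 := ⟨Int.emod_nonneg m (by norm_num), Int.emod_lt_of_pos m h10⟩
      have htn : 0 ≤ t := by nlinarith [hmodt.1]
      rw [PySem.Int.mod_eq_emod_of_pos h10, PySem.Int.floordiv_eq_ediv_of_pos h10]
      have hdiv : (0:Int) ≤ m / 10 := Int.ediv_nonneg hm (by norm_num)
      have hrec := ih (m / 10) c (t / 10) (by omega) hdiv hc (Int.ediv_nonneg htn (by norm_num))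
      rw [List.cons_append, hrec]
      have hmc : 0 < m * c + carry := by nlinarith
      rw [carryDigits_pos hmc,
          PySem.Int.mod_eq_emod_of_pos h10, PySem.Int.floordiv_eq_ediv_of_pos h10]
      have hsplit : m * c + carry = t + 10 * (m / 10 * c) := by
        ring_nf
        nlinarith [Int.emod_add_mul_ediv m 10]
      have e1 : t % 10 = (m * c + carry) % 10 := by rw [hsplit]; omega
      have e2 : m / 10 * c + t / 10 = (m * c + carry) / 10 := by rw [hsplit]; omega
      rw [e1, e2]
    · have hm0 : m = 0 := by omega
      subst hm0
      rw [carryDigits_nonpos (by omega)]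
      simp [mulDigits]

-- the outer loop keeps arr = digit string of the running product
lemma foldl_digits :
    ∀ (l : List Int) (P : Int), 1 ≤ P → (∀ c ∈ l, 1 ≤ c) →
      l.foldl (fun arr current_num =>
          let p := mulDigits arr current_num 0
          p.1 ++ carryDigits p.2) (carryDigits P)
        = carryDigits (l.foldl (fun r c => r * c) P) := by
  intro l
  induction l with
  | nil => intro P _ _; rfl
  | cons c rest ih =>
    intro P hP hl
    have hc : 1 ≤ c := hl c (by simp)
    simp only [List.foldl_cons]
    have hstep := mulDigits_carry P.toNat P c 0 le_rfl (by omega) hc le_rfl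
    rw [add_zero] at hstep
    rw [hstep]
    exact ih (P * c) (by nlinarith) (fun x hx => hl x (by simp [hx]))

lemma join_nil_append (l : List (List Char)) (t : List Char) :
    PySem.Chars.join [] (l ++ [t]) = PySem.Chars.join [] l ++ t := by
  have flat : ∀ (xs : List (List Char)), List.intercalate ([] : List Char) xs = xs.flatten := by
    intro xs
    induction xs with
    | nil => rfl
    | cons a u ihu => cases u <;> simp_all [List.intercalate, List.intersperse, List.flatten]
  simp [PySem.Chars.join, flat]

-- Nat.toDigits with any sufficient fuel and accumulator, in closed form
lemma toDigitsCore_eq (n : Nat) :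
    ∀ (f : Nat) (l : List Char), n < f →
      Nat.toDigitsCore 10 f n l = Nat.toDigits 10 n ++ l := by
  induction n using Nat.strong_induction_on with
  | _ n ih =>
    intro f l hf
    match f with
    | f + 1 =>
      rw [Nat.toDigitsCore]
      by_cases h0 : n / 10 = 0
      · simp only [h0, if_true]
        rw [Nat.toDigits, Nat.toDigitsCore]
        simp [h0]
      · have hdlt : n / 10 < n := Nat.div_lt_self (by omega) (by norm_num)
        simp only [h0, if_false]
        rw [ih (n / 10) hdlt f _ (by omega)]
        have hrhs : Nat.toDigits 10 n = Nat.toDigitsCore 10 n (n / 10) [Nat.digitChar (n % 10)] := by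
          rw [Nat.toDigits, Nat.toDigitsCore]
          simp only [h0, if_false]
        rw [hrhs, ih (n / 10) hdlt n _ hdlt]
        simp

lemma toDigits_rec {n : Nat} (h : 10 ≤ n) :
    Nat.toDigits 10 n = Nat.toDigits 10 (n / 10) ++ [Nat.digitChar (n % 10)] := by
  rw [Nat.toDigits, Nat.toDigitsCore]
  have h0 : ¬ n / 10 = 0 := by omega
  simp only [h0, if_false]
  exact toDigitsCore_eq (n / 10) n _ (Nat.div_lt_self (by omega) (by norm_num))

lemma toDigits_small {n : Nat} (h : n < 10) : Nat.toDigits 10 n = [Nat.digitChar n] := by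
  rw [Nat.toDigits, Nat.toDigitsCore]
  simp [Nat.div_eq_of_lt h, Nat.mod_eq_of_lt h]

lemma toChars_nonneg {c : Int} (h : 0 ≤ c) :
    PySem.Int.toChars c = Nat.toDigits 10 c.toNat := by
  simp [PySem.Int.toChars, not_lt.mpr h]

-- joining the single-digit strings of the reversed digit list is str() of the value
lemma join_carryDigits (k : Nat) :
    ∀ (P : Int), P.toNat ≤ k → 1 ≤ P →
      PySem.Chars.join [] (((carryDigits P).reverse).map PySem.Int.toChars)
        = PySem.Int.toChars P := by
  induction k with
  | zero => intro P hk hP; omega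
  | succ k ih =>
    intro P hk hP
    have h10 : (0:Int) < 10 := by norm_num
    rw [carryDigits_pos (by omega),
        PySem.Int.mod_eq_emod_of_pos h10, PySem.Int.floordiv_eq_ediv_of_pos h10]
    have hmod : 0 ≤ P % 10 ∧ P % 10 < 10 := ⟨Int.emod_nonneg P (by norm_num), Int.emod_lt_of_pos P h10⟩
    have hmodchars : PySem.Int.toChars (P % 10) = [Nat.digitChar (P % 10).toNat] := by
      rw [toChars_nonneg hmod.1, toDigits_small (by omega)]
    by_cases hsmall : P < 10
    · have : P / 10 = 0 := by omega
      rw [this, carryDigits_nonpos (by norm_num)]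
      simp only [List.reverse_cons, List.reverse_nil, List.nil_append, List.map_cons, List.map_nil]
      rw [show ([PySem.Int.toChars (P % 10)]) = [] ++ [PySem.Int.toChars (P % 10)] from rfl]
      rw [join_nil_append]
      rw [Int.emod_eq_of_lt (by omega) hsmall]
      simp [PySem.Chars.join, List.intercalate]
    · have hdiv1 : 1 ≤ P / 10 := by omega
      have hdivk : (P / 10).toNat ≤ k := by omega
      simp only [List.reverse_cons, List.map_append, List.map_cons, List.map_nil]
      rw [join_nil_append, ih (P / 10) hdivk hdiv1]
      rw [hmodchars, toChars_nonneg (by omega), toChars_nonneg (by omega)]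
      rw [toDigits_rec (n := P.toNat) (by omega)]
      congr 2
      · omega
      · congr 1; omega

lemma prod_ge_one (l : List Int) : ∀ (P : Int), 1 ≤ P → (∀ c ∈ l, 1 ≤ c) →
    1 ≤ l.foldl (fun r c => r * c) P := by
  induction l with
  | nil => intro P hP _; exact hP
  | cons c rest ih =>
    intro P hP hl
    simp only [List.foldl_cons]
    exact ih (P * c) (by nlinarith [hl c (by simp)]) (fun x hx => hl x (by simp [hx]))

-- ===== VERDICT (by name: the statement is the Claim_ definition above) =====
theorem bare_array_spec : Claim_equal_bare_array := by
  intro n _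
  unfold Spec_bare_array bare_array bare_array_alt
  have hmem : ∀ c ∈ PySem.List.pyRange 2 (n + 1), (1:Int) ≤ c := by
    intro c hc
    have := PySem.List.mem_pyRange_one.mp hc
    omega
  have h1 : carryDigits 1 = [1] := by
    rw [carryDigits_pos (by norm_num), PySem.Int.mod_eq_emod_of_pos (by norm_num),
        PySem.Int.floordiv_eq_ediv_of_pos (by norm_num)]
    norm_num [carryDigits_nonpos]
  rw [← h1]
  rw [foldl_digits _ 1 le_rfl hmem]
  set P := (PySem.List.pyRange 2 (n + 1)).foldl (fun r c => r * c) 1 with hP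
  have hP1 : 1 ≤ P := prod_ge_one _ 1 le_rfl hmem
  apply String.toList_inj.mp
  rw [PySem.Str.toList_join, PySem.Int.toList_toStr]
  have : (List.map PySem.Int.toStr (carryDigits P).reverse).map String.toList
      = ((carryDigits P).reverse).map PySem.Int.toChars := by
    simp [List.map_map, Function.comp, PySem.Int.toList_toStr]
  rw [this, show ("".toList) = ([] : List Char) from rfl]
  exact join_carryDigits P.toNat P le_rfl hP1
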